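-- pv_equiv track=rewrite | github.com/kfl/staffeli_nt | staffeli_nt/distribute.py | balance_submissions
-- ===== SOURCE A (Python) =====
-- def balance_two_lists (l1, l2):
--     combined = l1 + l2
--     length = len (combined)
--     return combined[:(length//2)], combined[(length//2):]
--
-- def balance_submissions (l):
--     if len(l) < 2:
--         return l
--
--     len_list = [ len (elem) for elem in l ]
--     min_ind = len_list.index (min (len_list))
--     max_ind = len_list.index (max (len_list))
--     l1 = l[min_ind]
--     l2 = l[max_ind]
--
--     if len (l2) - len (l1) < 2:
--         return l
--     else:
--         l1_balanced, l2_balanced = balance_two_lists (l1, l2)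
--         l[min_ind] = l1_balanced
--         l[max_ind] = l2_balanced
--         return balance_submissions (l)
-- ===== SOURCE B (Python) =====
-- def balance_submissions(l):
--     if len(l) < 2:
--         return l
--     while True:
--         min_ind = 0
--         max_ind = 0
--         for i in range(1, len(l)):
--             if len(l[i]) < len(l[min_ind]):
--                 min_ind = i
--             if len(l[i]) > len(l[max_ind]):
--                 max_ind = i
--         if len(l[max_ind]) - len(l[min_ind]) < 2:
--             return l
--         combined = l[min_ind] + l[max_ind]
--         h = len(combined) // 2
--         l[min_ind] = combined[:h]
--         l[max_ind] = combined[h:]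
-- ===== Notes on version B (the rewrite author's own statement) =====
-- stated objective: simpler
-- what changed: Replaces A's recursion plus the balance_two_lists helper with a single iterative while-loop that finds the first min/max indices in one enumeration pass (no len_list materialisation, no min/max/.index rescans) and splits the combined list inline.
import Mathlib
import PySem

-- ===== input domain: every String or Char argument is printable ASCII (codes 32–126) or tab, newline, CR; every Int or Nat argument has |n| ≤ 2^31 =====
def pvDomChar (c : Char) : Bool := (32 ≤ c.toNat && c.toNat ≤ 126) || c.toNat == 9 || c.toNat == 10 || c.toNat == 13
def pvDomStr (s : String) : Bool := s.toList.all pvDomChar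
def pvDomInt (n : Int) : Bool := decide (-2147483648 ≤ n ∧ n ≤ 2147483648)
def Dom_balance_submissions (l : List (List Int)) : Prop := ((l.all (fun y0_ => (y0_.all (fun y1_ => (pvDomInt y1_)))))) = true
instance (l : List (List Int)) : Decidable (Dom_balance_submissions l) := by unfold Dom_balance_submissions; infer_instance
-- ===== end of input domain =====

-- B replaces A's recursion + balance_two_lists helper by one iterative loop that finds the
-- first min/max indices in a single enumeration pass (objective: simpler). Both Pythons mutate l in place identically; the theorems are about
-- the return value. Both ports carry a fuel counter (Σ len(e)² + 1, a bound on the number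
-- of passes) purely as a totality guard; it never changes the computed value.

-- ===== PORT A =====
def pvFuel (l : List (List Int)) : Nat := (l.map (fun e => e.length * e.length)).sum + 1

def balance_two_lists (l1 l2 : List Int) : List Int × List Int :=
  let combined := l1 ++ l2
  let length : Int := (combined.length : Int)
  (PySem.List.slice combined none (some (PySem.Int.floordiv length 2)),
   PySem.List.slice combined (some (PySem.Int.floordiv length 2)) none)

def balance_submissions_go : Nat → List (List Int) → List (List Int)
  | 0, l => l
  | fuel+1, l =>
    if l.length < 2 then l
    else
      let len_list : List Int := l.map (fun elem => (elem.length : Int))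
      match PySem.List.min? len_list (fun x => x), PySem.List.max? len_list (fun x => x) with
      | some mn, some mx =>
        match PySem.List.index? len_list mn, PySem.List.index? len_list mx with
        | some min_ind, some max_ind =>
          let l1 := PySem.List.pyGetD l (min_ind : Int) []
          let l2 := PySem.List.pyGetD l (max_ind : Int) []
          if (l2.length : Int) - (l1.length : Int) < 2 then l
          else
            let bp := balance_two_lists l1 l2
            balance_submissions_go fuel
              (PySem.List.pySetD (PySem.List.pySetD l (min_ind : Int) bp.1) (max_ind : Int) bp.2)
        | _, _ => l
      | _, _ => l

def balance_submissions (l : List (List Int)) : List (List Int) :=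
  balance_submissions_go (pvFuel l) l

-- ===== PORT B =====

def balance_submissions_loop : Nat → List (List Int) → List (List Int)
  | 0, l => l
  | fuel+1, l =>
    let p := (PySem.List.pyRange 1 (l.length : Int) 1).foldl
      (fun (p : Int × Int) i =>
        ((if (PySem.List.pyGetD l i []).length < (PySem.List.pyGetD l p.1 []).length then i else p.1),
         (if (PySem.List.pyGetD l i []).length > (PySem.List.pyGetD l p.2 []).length then i else p.2)))
      (0, 0)
    if ((PySem.List.pyGetD l p.2 []).length : Int) - ((PySem.List.pyGetD l p.1 []).length : Int) < 2 then l
    else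
      let combined := PySem.List.pyGetD l p.1 [] ++ PySem.List.pyGetD l p.2 []
      let h := PySem.Int.floordiv (combined.length : Int) 2
      balance_submissions_loop fuel
        (PySem.List.pySetD (PySem.List.pySetD l p.1 (PySem.List.slice combined none (some h)))
          p.2 (PySem.List.slice combined (some h) none))

def balance_submissions_alt (l : List (List Int)) : List (List Int) :=
  if l.length < 2 then l else balance_submissions_loop (pvFuel l) l

-- ===== PRECONDITION & SPEC =====
def Spec_balance_submissions (l : List (List Int)) (out : List (List Int)) : Prop := out = balance_submissions_alt l
instance (l : List (List Int)) (out : List (List Int)) : Decidable (Spec_balance_submissions l out) := by unfold Spec_balance_submissions; infer_instance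

-- ===== CLAIM (what is proved, stated in full; the proofs are below) =====
def Claim_equal_balance_submissions : Prop := ∀ (l : List (List Int)), Dom_balance_submissions l → Spec_balance_submissions l (balance_submissions l)

-- ===== LEMMAS AND PROOFS =====

-- length of entry k (every index used below is in range)
def pvLenAt (l : List (List Int)) (k : Nat) : Nat := (l.getD k []).length

-- j is the first index realising the minimum (resp. maximum) length among the first n entries
def pvIsFirstMin (l : List (List Int)) (n j : Nat) : Prop :=
  j < n ∧ (∀ k, k < n → pvLenAt l j ≤ pvLenAt l k) ∧ (∀ k, k < j → pvLenAt l j < pvLenAt l k)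

def pvIsFirstMax (l : List (List Int)) (n j : Nat) : Prop :=
  j < n ∧ (∀ k, k < n → pvLenAt l k ≤ pvLenAt l j) ∧ (∀ k, k < j → pvLenAt l k < pvLenAt l j)

theorem pvFirstMin_unique {l : List (List Int)} {n j j' : Nat}
    (h : pvIsFirstMin l n j) (h' : pvIsFirstMin l n j') : j = j' := by
  obtain ⟨hj, hmin, hfst⟩ := h
  obtain ⟨hj', hmin', hfst'⟩ := h'
  rcases Nat.lt_trichotomy j j' with hlt | he | hgt
  · exact absurd (hmin j' hj') (not_le.mpr (hfst' j hlt))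
  · exact he
  · exact absurd (hmin' j hj) (not_le.mpr (hfst j' hgt))

theorem pvFirstMax_unique {l : List (List Int)} {n j j' : Nat}
    (h : pvIsFirstMax l n j) (h' : pvIsFirstMax l n j') : j = j' := by
  obtain ⟨hj, hmax, hfst⟩ := h
  obtain ⟨hj', hmax', hfst'⟩ := h'
  rcases Nat.lt_trichotomy j j' with hlt | he | hgt
  · exact absurd (hmax j' hj') (not_le.mpr (hfst' j hlt))
  · exact he
  · exact absurd (hmax' j hj) (not_le.mpr (hfst j' hgt))

theorem pvLenList_getElem (l : List (List Int)) (k : Nat) (hk : k < l.length) :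
    (l.map (fun e => (e.length : Int)))[k]'(by simpa using hk) = ((pvLenAt l k : Nat) : Int) := by
  simp [pvLenAt, List.getD_eq_getElem?_getD, List.getElem?_eq_getElem hk]

-- A-side: len_list.index(min(len_list)) is the first-min index
theorem pvA_min_spec {l : List (List Int)} {mn : Int} {j : Nat}
    (hmn : PySem.List.min? (l.map (fun e => (e.length : Int))) (fun x => x) = some mn)
    (hidx : PySem.List.index? (l.map (fun e => (e.length : Int))) mn = some j) :
    pvIsFirstMin l l.length j := by
  obtain ⟨hj, hval, hpre⟩ := PySem.List.getElem_of_index?_eq_some hidx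
  have hjl : j < l.length := by simpa using hj
  have hmin := PySem.List.min?_isMin hmn
  have hgetj : ((pvLenAt l j : Nat) : Int) = mn := by rw [← pvLenList_getElem l j hjl]; exact hval
  refine ⟨hjl, ?_, ?_⟩
  · intro k hk
    have hm : mn ≤ ((pvLenAt l k : Nat) : Int) := by
      have := hmin _ (List.getElem_mem (l := l.map (fun e => (e.length : Int))) (by simpa using hk))
      rwa [pvLenList_getElem l k hk] at this
    rw [← hgetj] at hm; exact_mod_cast hm
  · intro k hkj
    have hkl : k < l.length := lt_trans hkj hjl
    have hne : ((pvLenAt l k : Nat) : Int) ≠ mn := by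
      rw [← pvLenList_getElem l k hkl]; exact hpre k hkj
    have hm : mn ≤ ((pvLenAt l k : Nat) : Int) := by
      have := hmin _ (List.getElem_mem (l := l.map (fun e => (e.length : Int))) (by simpa using hkl))
      rwa [pvLenList_getElem l k hkl] at this
    rw [← hgetj] at hm hne
    have h1 : pvLenAt l j ≤ pvLenAt l k := by exact_mod_cast hm
    have h2 : pvLenAt l j ≠ pvLenAt l k := by exact_mod_cast fun h => hne (by rw [h])
    omega

-- A-side: len_list.index(max(len_list)) is the first-max index
theorem pvA_max_spec {l : List (List Int)} {mx : Int} {j : Nat}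
    (hmx : PySem.List.max? (l.map (fun e => (e.length : Int))) (fun x => x) = some mx)
    (hidx : PySem.List.index? (l.map (fun e => (e.length : Int))) mx = some j) :
    pvIsFirstMax l l.length j := by
  obtain ⟨hj, hval, hpre⟩ := PySem.List.getElem_of_index?_eq_some hidx
  have hjl : j < l.length := by simpa using hj
  have hmax := PySem.List.max?_isMax hmx
  have hgetj : ((pvLenAt l j : Nat) : Int) = mx := by rw [← pvLenList_getElem l j hjl]; exact hval
  refine ⟨hjl, ?_, ?_⟩
  · intro k hk
    have hm : ((pvLenAt l k : Nat) : Int) ≤ mx := by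
      have := hmax _ (List.getElem_mem (l := l.map (fun e => (e.length : Int))) (by simpa using hk))
      rwa [pvLenList_getElem l k hk] at this
    rw [← hgetj] at hm; exact_mod_cast hm
  · intro k hkj
    have hkl : k < l.length := lt_trans hkj hjl
    have hne : ((pvLenAt l k : Nat) : Int) ≠ mx := by
      rw [← pvLenList_getElem l k hkl]; exact hpre k hkj
    have hm : ((pvLenAt l k : Nat) : Int) ≤ mx := by
      have := hmax _ (List.getElem_mem (l := l.map (fun e => (e.length : Int))) (by simpa using hkl))
      rwa [pvLenList_getElem l k hkl] at this
    rw [← hgetj] at hm hne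
    have h1 : pvLenAt l k ≤ pvLenAt l j := by exact_mod_cast hm
    have h2 : pvLenAt l k ≠ pvLenAt l j := by exact_mod_cast fun h => hne (by rw [h])
    omega

-- B-side: the one-pass scan returns the first-min / first-max indices
theorem pvB_scan_gen (l : List (List Int)) (m : Nat) (h1 : 1 ≤ m) (hm : m ≤ l.length) :
    ∃ j1 j2 : Nat,
      (PySem.List.pyRange 1 (m : Int) 1).foldl
        (fun (p : Int × Int) i =>
          ((if (PySem.List.pyGetD l i []).length < (PySem.List.pyGetD l p.1 []).length then i else p.1),
           (if (PySem.List.pyGetD l i []).length > (PySem.List.pyGetD l p.2 []).length then i else p.2)))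
        (0, 0) = ((j1 : Int), (j2 : Int)) ∧
      pvIsFirstMin l m j1 ∧ pvIsFirstMax l m j2 := by
  induction m with
  | zero => omega
  | succ m ih =>
    by_cases hm1 : m = 0
    · subst hm1
      refine ⟨0, 0, ?_, ⟨by omega, ?_, by omega⟩, ⟨by omega, ?_, by omega⟩⟩
      · rw [PySem.List.pyRange_one_eq_nil (by norm_num)]; rfl
      · intro k hk; interval_cases k; rfl
      · intro k hk; interval_cases k; rfl
    · obtain ⟨j1, j2, hfold, ⟨hj1, hmin1, hfst1⟩, ⟨hj2, hmax2, hfst2⟩⟩ :=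
        ih (by omega) (by omega)
      have hcast : ((m + 1 : Nat) : Int) = (m : Int) + 1 := by push_cast; ring
      have hsplit := PySem.List.pyRange_one_succ_right (a := 1) (b := (m : Int)) (by exact_mod_cast Nat.one_le_iff_ne_zero.mpr hm1)
      have hgd : ∀ k : Nat, PySem.List.pyGetD l ((k : Nat) : Int) [] = l.getD k [] := by
        intro k; simp [PySem.List.pyGetD_natCast]
      refine ⟨(if pvLenAt l m < pvLenAt l j1 then m else j1),
              (if pvLenAt l m > pvLenAt l j2 then m else j2), ?_, ?_, ?_⟩
      · rw [hcast, hsplit, List.foldl_append, hfold]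
        simp only [List.foldl_cons, List.foldl_nil, hgd]
        unfold pvLenAt
        split_ifs <;> simp_all
      · constructor
        · split_ifs <;> omega
        · constructor
          · intro k hk
            rcases Nat.lt_succ_iff_lt_or_eq.mp hk with hk' | hk'
            · split_ifs with h
              · exact le_of_lt (lt_of_lt_of_le h (hmin1 k hk'))
              · exact hmin1 k hk'
            · subst hk'; split_ifs with h <;> omega
          · intro k hk
            split_ifs at hk ⊢ with h
            · exact lt_of_lt_of_le h (hmin1 k (by omega))
            · exact hfst1 k hk
      · constructor
        · split_ifs <;> omega
        · constructor
          · intro k hk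
            rcases Nat.lt_succ_iff_lt_or_eq.mp hk with hk' | hk'
            · split_ifs with h
              · exact le_of_lt (lt_of_le_of_lt (hmax2 k hk') h)
              · exact hmax2 k hk'
            · subst hk'; split_ifs with h <;> omega
          · intro k hk
            split_ifs at hk ⊢ with h
            · exact lt_of_le_of_lt (hmax2 k (by omega)) h
            · exact hfst2 k hk

-- the two iteration bodies agree pass by pass (same extremal indices, same split)
theorem pv_go_eq_loop (fuel : Nat) (l : List (List Int)) (hl : 2 ≤ l.length) :
    balance_submissions_go fuel l = balance_submissions_loop fuel l := by
  induction fuel generalizing l with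
  | zero => rfl
  | succ fuel ih =>
    have hne : l.map (fun e => (e.length : Int)) ≠ [] := by
      intro h; have := congrArg List.length h; simp only [List.length_map, List.length_nil] at this; omega
    cases hmn : PySem.List.min? (l.map (fun e => (e.length : Int))) (fun x => x) with
    | none => exact absurd ((PySem.List.min?_eq_none_iff _ _).mp hmn) hne
    | some mn =>
    cases hmx : PySem.List.max? (l.map (fun e => (e.length : Int))) (fun x => x) with
    | none => exact absurd ((PySem.List.max?_eq_none_iff _ _).mp hmx) hne
    | some mx =>
    have hmem1 : mn ∈ l.map (fun e => (e.length : Int)) := PySem.List.min?_mem hmn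
    have hmem2 : mx ∈ l.map (fun e => (e.length : Int)) := PySem.List.max?_mem hmx
    obtain ⟨j1, hidx1⟩ := Option.isSome_iff_exists.mp ((PySem.List.index?_isSome_iff _ _).mpr hmem1)
    obtain ⟨j2, hidx2⟩ := Option.isSome_iff_exists.mp ((PySem.List.index?_isSome_iff _ _).mpr hmem2)
    have hA1 := pvA_min_spec hmn hidx1
    have hA2 := pvA_max_spec hmx hidx2
    obtain ⟨k1, k2, hfold, hB1, hB2⟩ := pvB_scan_gen l l.length (by omega) le_rfl
    have e1 : j1 = k1 := pvFirstMin_unique hA1 hB1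
    have e2 : j2 = k2 := pvFirstMax_unique hA2 hB2
    subst e1; subst e2
    show (if l.length < 2 then l else _) = _
    rw [if_neg (by omega)]
    simp only [balance_submissions_loop, hmn, hmx, hidx1, hidx2, hfold, balance_two_lists]
    split_ifs with hg
    · rfl
    · exact ih _ (by simpa using hl)

-- ===== VERDICT (by name: the statement is the Claim_ definition above) =====
theorem balance_submissions_spec : Claim_equal_balance_submissions := by
  intro l _
  unfold Spec_balance_submissions balance_submissions balance_submissions_alt
  by_cases h : l.length < 2
  · rw [if_pos h]
    simp [pvFuel, balance_submissions_go, h]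
  · rw [if_neg h]
    exact pv_go_eq_loop _ l (by omega)
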